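-- pv_equiv track=rewrite | github.com/sanchezpaez/clt21_sandra_sanchez_copy | evaluate.py | get_possible_matches
-- ===== SOURCE A (Python) =====
-- def get_possible_matches(calculated_alignments, gold_alignments):
--     """
--     Get all matching possible alignments.
--     Iterate over the calculated alignment list.
--     When a word alignment in a sentence is found in its respective
--     golden aligned sentence, count it as match.
--     :param calculated_alignments: list of lists of str.
--     :param gold_alignments: list of lists of tuples of str.
--     :return: int
--     """
--     matches = 0
--     pairs = zip(calculated_alignments, gold_alignments)
--     for pair in pairs:
--         for aligned_word in pair[0]:
--             if (aligned_word, 'S') in pair[1]: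
--                 matches += 1
--             elif (aligned_word, 'P') in pair[1]:
--                 matches += 1
--             else:
--                 pass
--     return matches
-- ===== SOURCE B (Python) =====
-- def get_possible_matches(calculated_alignments, gold_alignments):
--     """
--     Count calculated word alignments present (tagged 'S' or 'P') in the
--     corresponding gold sentence.  Indexes the calculated words by frequency
--     once per sentence, then iterates over the distinct gold-valid words.
--     :return: int
--     """
--     total = 0
--     for calc, gold in zip(calculated_alignments, gold_alignments):
--         freq = {}
--         for w in calc:
--             freq[w] = freq.get(w, 0) + 1
--         valid = {w for (w, tag) in gold if tag == 'S' or tag == 'P'}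
--         total += sum(freq.get(w, 0) for w in valid)
--     return total
-- ===== Notes on version B (the rewrite author's own statement) =====
-- stated objective: faster
-- what changed: Instead of scanning the gold list twice per calculated word, B builds a frequency dict of the calculated words and a deduplicated set of gold words tagged 'S' or 'P' per sentence, then sums frequencies over that set, reversing the membership direction.
import Mathlib
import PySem

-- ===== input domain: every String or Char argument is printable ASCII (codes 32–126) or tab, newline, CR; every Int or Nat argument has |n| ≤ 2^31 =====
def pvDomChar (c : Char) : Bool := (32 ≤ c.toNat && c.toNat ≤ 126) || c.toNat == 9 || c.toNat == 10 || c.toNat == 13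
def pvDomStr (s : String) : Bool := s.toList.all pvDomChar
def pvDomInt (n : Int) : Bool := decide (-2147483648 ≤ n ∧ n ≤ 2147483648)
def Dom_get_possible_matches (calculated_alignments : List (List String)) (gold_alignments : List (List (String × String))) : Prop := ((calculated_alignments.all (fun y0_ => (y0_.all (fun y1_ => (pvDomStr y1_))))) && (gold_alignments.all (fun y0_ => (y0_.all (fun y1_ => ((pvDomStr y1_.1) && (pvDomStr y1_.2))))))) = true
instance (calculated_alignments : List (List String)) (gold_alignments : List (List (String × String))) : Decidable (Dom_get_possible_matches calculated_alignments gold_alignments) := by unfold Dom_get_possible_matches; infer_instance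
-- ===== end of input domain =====

-- B replaces A's per-word scans of the gold list by a per-sentence frequency dict of the
-- calculated words plus a deduplicated set of gold words tagged "S"/"P" (alternative decomposition).

-- ===== PORT A =====
def get_possible_matches (calculated_alignments : List (List String)) (gold_alignments : List (List (String × String))) : Int :=
  let pairs := List.zip calculated_alignments gold_alignments
  pairs.foldl (fun ms pair =>
    pair.1.foldl (fun ms aligned_word =>
      if pair.2.contains (aligned_word, "S") then ms + 1
      else if pair.2.contains (aligned_word, "P") then ms + 1
      else ms) ms) 0

-- ===== PORT B =====
def get_possible_matches_alt (calculated_alignments : List (List String)) (gold_alignments : List (List (String × String))) : Int :=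
  (List.zip calculated_alignments gold_alignments).foldl (fun total p =>
    let freq : PySem.Dict String Int :=
      p.1.foldl (fun d w => d.insert w (d.getD w 0 + 1)) PySem.Dict.empty
    let valid : PySem.Set String :=
      PySem.Set.ofList ((p.2.filter (fun t => t.2 == "S" || t.2 == "P")).map Prod.fst)
    total + valid.foldl (fun s w => s + freq.getD w 0) 0) 0

-- ===== PRECONDITION & SPEC =====
def Spec_get_possible_matches (calculated_alignments : List (List String)) (gold_alignments : List (List (String × String))) (out : Int) : Prop := out = get_possible_matches_alt calculated_alignments gold_alignments
instance (calculated_alignments : List (List String)) (gold_alignments : List (List (String × String))) (out : Int) : Decidable (Spec_get_possible_matches calculated_alignments gold_alignments out) := by unfold Spec_get_possible_matches; infer_instance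

-- ===== CLAIM (what is proved, stated in full; the proofs are below) =====
def Claim_equal_get_possible_matches : Prop := ∀ (calculated_alignments : List (List String)) (gold_alignments : List (List (String × String))), Dom_get_possible_matches calculated_alignments gold_alignments → Spec_get_possible_matches calculated_alignments gold_alignments (get_possible_matches calculated_alignments gold_alignments)

-- ===== LEMMAS AND PROOFS =====

-- A's inner loop counts the calculated words whose (w,"S") or (w,"P") pair occurs in the gold list.
lemma innerA_eq_countP (cl : List String) (gold : List (String × String)) (m : Int) :
    cl.foldl (fun ms aligned_word =>
      if gold.contains (aligned_word, "S") then ms + 1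
      else if gold.contains (aligned_word, "P") then ms + 1
      else ms) m
    = m + (cl.countP (fun w => gold.contains (w, "S") || gold.contains (w, "P")) : Int) := by
  induction cl generalizing m with
  | nil => simp
  | cons c cs ih =>
    simp only [List.foldl_cons, List.countP_cons, ih]
    by_cases hS : gold.contains (c, "S") = true <;>
      by_cases hP : gold.contains (c, "P") = true <;>
        simp only [hS, hP, if_true, Bool.true_or, Bool.false_or, Bool.or_false] <;>
        push_cast <;> ring

-- over a duplicate-free list, a sum of 0/1 indicators is a membership test
lemma sum_ite_eq_of_nodup (vs : List String) (hnd : vs.Nodup) (c : String) :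
    (vs.map (fun w => if w = c then (1 : Int) else 0)).sum = if c ∈ vs then 1 else 0 := by
  induction vs with
  | nil => simp
  | cons v vt ih =>
    obtain ⟨hv, hvt⟩ := List.nodup_cons.mp hnd
    by_cases h : v = c
    · subst h; simp [ih hvt, hv]
    · simp [h, ih hvt, Ne.symm h]

-- summing occurrence counts over a duplicate-free list of words equals counting membership
lemma sum_count_nodup (vs : List String) (hnd : vs.Nodup) (cl : List String) :
    (vs.map (fun w => (cl.count w : Int))).sum
    = (cl.countP (fun w => vs.contains w) : Int) := by
  induction cl with
  | nil => simp
  | cons c cs ih =>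
    have hmap : vs.map (fun w => (((c :: cs).count w : Nat) : Int))
        = vs.map (fun w => ((cs.count w : Nat) : Int) + (if w = c then 1 else 0)) := by
      apply List.map_congr_left; intro w _
      by_cases h : w = c <;> simp [h, Ne.symm]
    rw [hmap, PySem.List.sum_map_add_int, ih, sum_ite_eq_of_nodup vs hnd c,
        List.countP_cons]
    by_cases h : c ∈ vs <;>
      simp [h, List.contains_eq_mem]

lemma mem_valid_iff (gold : List (String × String)) (w : String) :
    (w ∈ (gold.filter (fun t => t.2 == "S" || t.2 == "P")).map Prod.fst)
    ↔ ((w, "S") ∈ gold ∨ (w, "P") ∈ gold) := by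
  constructor
  · rintro h
    rcases List.mem_map.mp h with ⟨⟨a, b⟩, ht, rfl⟩
    rcases List.mem_filter.mp ht with ⟨hg, hsp⟩
    simp only [Bool.or_eq_true, beq_iff_eq] at hsp
    rcases hsp with rfl | rfl
    · exact Or.inl hg
    · exact Or.inr hg
  · rintro (h | h) <;>
      exact List.mem_map.mpr ⟨_, List.mem_filter.mpr ⟨h, by simp⟩, rfl⟩

-- ===== VERDICT (by name: the statement is the Claim_ definition above) =====
theorem get_possible_matches_spec : Claim_equal_get_possible_matches := by
  intro ca ga _
  unfold Spec_get_possible_matches get_possible_matches get_possible_matches_alt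
  apply PySem.List.foldl_congr_mem
  intro acc p _
  rw [innerA_eq_countP]
  congr 1
  rw [PySem.List.foldl_add]
  simp only [PySem.Dict.getD_foldl_insert_add_one, PySem.Dict.getD_empty, zero_add]
  rw [sum_count_nodup _ (PySem.Set.nodup_ofList _)]
  congr 1
  apply List.countP_congr
  intro w _
  simp only [List.contains_eq_mem, Bool.or_eq_true, decide_eq_true_eq,
    PySem.Set.mem_ofList]
  exact (mem_valid_iff p.2 w).symm
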